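-- pv_equiv track=rewrite | github.com/tesdartcncr-boop/TESDA_RTC | backend/app/services/report_service.py | _compose_employee_display_name
-- ===== SOURCE A (Python) =====
-- def _compose_employee_display_name(employee: dict) -> str:
--   parts = [
--     employee.get("first_name"),
--     employee.get("second_name"),
--     employee.get("last_name"),
--     employee.get("extension")
--   ]
--   full_name = " ".join(part.strip() for part in parts if isinstance(part, str) and part.strip())
--   if full_name:
--     return " ".join(full_name.split())
--
--   return (employee.get("display_name") or employee.get("name") or "Unknown Employee").strip() or "Unknown Employee"
-- ===== SOURCE B (Python) =====
-- def _compose_employee_display_name(employee: dict) -> str: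
--   # single character-level pass: whitespace-collapsing state machine, no split/join of tokens
--   out = []
--   pending = True
--   for key in ("first_name", "second_name", "last_name", "extension"):
--     value = employee.get(key)
--     if isinstance(value, str):
--       for ch in value:
--         if ch.isspace():
--           pending = True
--         else:
--           if pending and out:
--             out.append(" ")
--           out.append(ch)
--           pending = False
--       pending = True
--   if out:
--     return "".join(out)
--   return (employee.get("display_name") or employee.get("name") or "Unknown Employee").strip() or "Unknown Employee"
-- ===== Notes on version B (the rewrite author's own statement) =====
-- stated objective: alternative
-- what changed: A builds a list of stripped field strings, joins them, then re-splits and re-joins to normalize whitespace; B never materializes tokens or intermediate strings: it runs one character-level state machine over the four fields (a pending-separator flag emits a single space before each new word), then joins the char buffer once; the fallback expression is unchanged.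
import Mathlib
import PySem

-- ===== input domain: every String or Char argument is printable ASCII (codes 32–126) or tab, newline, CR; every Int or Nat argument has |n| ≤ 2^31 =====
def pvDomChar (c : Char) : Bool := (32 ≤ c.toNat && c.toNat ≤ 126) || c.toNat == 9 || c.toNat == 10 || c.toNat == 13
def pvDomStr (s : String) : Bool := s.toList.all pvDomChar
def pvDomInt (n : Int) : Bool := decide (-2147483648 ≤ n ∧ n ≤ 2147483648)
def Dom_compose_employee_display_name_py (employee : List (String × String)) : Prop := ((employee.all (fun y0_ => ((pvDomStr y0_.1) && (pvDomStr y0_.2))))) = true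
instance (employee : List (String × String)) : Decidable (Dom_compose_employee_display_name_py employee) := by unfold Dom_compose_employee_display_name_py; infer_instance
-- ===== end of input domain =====

-- B replaces A's strip/join/re-split token pipeline by one character-level whitespace-collapsing state machine (alternative algorithm, same cost).

-- ===== PORT A =====
def compose_employee_display_name_py (employee : List (String × String)) : String :=
  let parts : List (Option String) :=
    [PySem.Dict.get? (PySem.Dict.mk employee) "first_name",
     PySem.Dict.get? (PySem.Dict.mk employee) "second_name",
     PySem.Dict.get? (PySem.Dict.mk employee) "last_name",
     PySem.Dict.get? (PySem.Dict.mk employee) "extension"]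
  -- " ".join(part.strip() for part in parts if isinstance(part, str) and part.strip())
  -- (all dict values are strings under the type convention, so isinstance(part, str) = the key is present)
  let full_name := PySem.Str.join " "
    (((parts.filterMap id).filter (fun p => !(PySem.Str.strip p == ""))).map PySem.Str.strip)
  if full_name ≠ "" then
    PySem.Str.join " " (PySem.Str.split₀ full_name)
  else
    -- (employee.get("display_name") or employee.get("name") or "Unknown Employee").strip() or "Unknown Employee"
    let base :=
      match PySem.Dict.get? (PySem.Dict.mk employee) "display_name" with
      | some s => if s = "" then
          (match PySem.Dict.get? (PySem.Dict.mk employee) "name" with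
           | some t => if t = "" then "Unknown Employee" else t
           | none => "Unknown Employee")
        else s
      | none =>
          (match PySem.Dict.get? (PySem.Dict.mk employee) "name" with
           | some t => if t = "" then "Unknown Employee" else t
           | none => "Unknown Employee")
    if PySem.Str.strip base = "" then "Unknown Employee" else PySem.Str.strip base

-- ===== PORT B =====
-- one character step of B's state machine: state = (out chars, pending-separator flag)
-- (ch.isspace() → PySem.Chars.isspace, exact on the ASCII domain)
def pvStep (st : List Char × Bool) (c : Char) : List Char × Bool :=
  if PySem.Chars.isspace c then (st.1, true)
  else (st.1 ++ (if st.2 && !st.1.isEmpty then [' '] else []) ++ [c], false)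

-- final fallback: (employee.get("display_name") or employee.get("name") or "Unknown Employee").strip() or "Unknown Employee"
def pvFallback (employee : List (String × String)) : String :=
  let base :=
    match PySem.Dict.get? (PySem.Dict.mk employee) "display_name" with
    | some s => if s = "" then
        (match PySem.Dict.get? (PySem.Dict.mk employee) "name" with
         | some t => if t = "" then "Unknown Employee" else t
         | none => "Unknown Employee")
      else s
    | none =>
        (match PySem.Dict.get? (PySem.Dict.mk employee) "name" with
         | some t => if t = "" then "Unknown Employee" else t
         | none => "Unknown Employee")
  if PySem.Str.strip base = "" then "Unknown Employee" else PySem.Str.strip base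

def compose_employee_display_name_py_alt (employee : List (String × String)) : String :=
  let st : List Char × Bool :=
    ["first_name", "second_name", "last_name", "extension"].foldl
      (fun st k =>
        match PySem.Dict.get? (PySem.Dict.mk employee) k with
        | some v => ((v.toList.foldl pvStep st).1, true)   -- inner char loop, then pending = True
        | none => st)
      ([], true)
  if st.1 ≠ [] then String.ofList st.1    -- "".join(out)
  else pvFallback employee

-- ===== PRECONDITION & SPEC =====
def Spec_compose_employee_display_name_py (employee : List (String × String)) (out : String) : Prop := out = compose_employee_display_name_py_alt employee
instance (employee : List (String × String)) (out : String) : Decidable (Spec_compose_employee_display_name_py employee out) := by unfold Spec_compose_employee_display_name_py; infer_instance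

-- ===== CLAIM (what is proved, stated in full; the proofs are below) =====
def Claim_equal_compose_employee_display_name_py : Prop := ∀ (employee : List (String × String)), Dom_compose_employee_display_name_py employee → Spec_compose_employee_display_name_py employee (compose_employee_display_name_py employee)

-- ===== LEMMAS AND PROOFS =====

-- words joined by single spaces, first word bare
def pvJoinTok : List (List Char) → List Char
  | [] => []
  | t :: ts => t ++ ts.flatMap (fun u => ' ' :: u)

-- abstract run of B's machine on one char list, indexed by (out empty?, pending)
def pvM (emptyOut pending : Bool) : List Char → List Char
  | [] => []
  | c :: r => if PySem.Chars.isspace c then pvM emptyOut true r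
      else (if pending && !emptyOut then [' '] else []) ++ c :: pvM false false r

-- the char fold of B computes pvM
theorem pv_inv (s : List Char) : ∀ (out : List Char) (p : Bool),
    (s.foldl pvStep (out, p)).1 = out ++ pvM out.isEmpty p s := by
  induction s with
  | nil => intro out p; simp [pvM]
  | cons c r ih =>
      intro out p
      by_cases h : PySem.Chars.isspace c = true
      · simp only [List.foldl_cons, pvStep, h, if_true, pvM, ih]
      · have hX : ((out ++ (if p && !out.isEmpty then [' '] else []) ++ [c])).isEmpty = false := by
          simp
        simp only [List.foldl_cons, pvStep, h, Bool.false_eq_true, if_false,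
          ih (out ++ (if p && !out.isEmpty then [' '] else []) ++ [c]) false, hX]
        simp [pvM, h]

-- go with an accumulator is the accumulator-free go, prefixed
theorem pv_go_acc (s : List Char) : ∀ cur acc,
    PySem.Chars.split₀.go s cur acc = acc.reverse ++ PySem.Chars.split₀.go s cur [] := by
  induction s with
  | nil => intro cur acc; simp [PySem.Chars.split₀.go]; split_ifs <;> simp
  | cons c rest ih =>
      intro cur acc
      simp only [PySem.Chars.split₀.go]
      split_ifs with h1 h2
      · rw [ih [] acc]
      · rw [ih [] (cur.reverse :: acc), ih [] [cur.reverse]]; simp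
      · exact ih (c :: cur) acc

theorem pv_go_eq_nil_iff (s : List Char) : ∀ cur acc,
    (PySem.Chars.split₀.go s cur acc = [] ↔
      acc = [] ∧ cur = [] ∧ s.all PySem.Chars.isspace = true) := by
  induction s with
  | nil =>
      intro cur acc
      simp only [PySem.Chars.split₀.go]
      split_ifs with h
      · simp [List.isEmpty_iff.mp h]
      · constructor
        · intro hh; simp at hh
        · rintro ⟨-, hcur, -⟩; simp [hcur] at h
  | cons c rest ih =>
      intro cur acc
      simp only [PySem.Chars.split₀.go, List.all_cons, Bool.and_eq_true]
      split_ifs with h1 h2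
      · rw [ih [] acc]; simp [h1, List.isEmpty_iff.mp h2]
      · rw [ih [] (cur.reverse :: acc)]
        constructor
        · intro hh; exact absurd hh.1 (by simp)
        · rintro ⟨-, hcur, -⟩; exact absurd hcur (by simpa [List.isEmpty_iff] using h2)
      · rw [ih (c :: cur) acc]
        constructor
        · intro hh; exact absurd hh.2.1 (by simp)
        · rintro ⟨-, -, hc, -⟩; exact absurd hc h1

-- every token go produces (beyond acc's) is nonempty
theorem pv_go_tokens_ne (s : List Char) : ∀ cur acc, (∀ t ∈ acc, t ≠ []) →
    ∀ t ∈ PySem.Chars.split₀.go s cur acc, t ≠ [] := by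
  induction s with
  | nil =>
      intro cur acc hacc t ht
      simp only [PySem.Chars.split₀.go] at ht
      split_ifs at ht with h
      · exact hacc t (by simpa using ht)
      · simp only [List.mem_reverse, List.mem_cons] at ht
        rcases ht with h1 | h1
        · subst h1; simpa [List.isEmpty_iff] using h
        · exact hacc t h1
  | cons c rest ih =>
      intro cur acc hacc t ht
      simp only [PySem.Chars.split₀.go] at ht
      split_ifs at ht with h1 h2
      · exact ih [] acc hacc t ht
      · refine ih [] (cur.reverse :: acc) ?_ t ht
        intro u hu
        rcases List.mem_cons.mp hu with h3 | h3
        · subst h3; simpa [List.isEmpty_iff] using h2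
        · exact hacc u h3
      · exact ih (c :: cur) acc hacc t ht

theorem pv_split0_tokens_ne (s : List Char) : ∀ t ∈ PySem.Chars.split₀ s, t ≠ [] := by
  intro t ht
  exact pv_go_tokens_ne s [] [] (by simp) t ht

-- the machine from the mid-word (Q: pending, out nonempty) and in-word (RG) states
theorem pv_QRG (s : List Char) :
    ((PySem.Chars.split₀ s).flatMap (fun u => ' ' :: u) = pvM false true s) ∧
    (∀ cur : List Char, cur ≠ [] →
      pvJoinTok (PySem.Chars.split₀.go s cur []) = cur.reverse ++ pvM false false s) := by
  induction s with
  | nil =>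
      constructor
      · simp [PySem.Chars.split₀, PySem.Chars.split₀.go, pvM]
      · intro cur hcur
        simp [PySem.Chars.split₀.go, List.isEmpty_iff, hcur, pvJoinTok, pvM]
  | cons c r ih =>
      obtain ⟨ihQ, ihRG⟩ := ih
      by_cases h : PySem.Chars.isspace c = true
      · constructor
        · simpa [PySem.Chars.split₀, PySem.Chars.split₀.go, h, pvM] using ihQ
        · intro cur hcur
          simp only [PySem.Chars.split₀.go, h, if_true, List.isEmpty_iff, hcur, pvM]
          rw [pv_go_acc r [] [cur.reverse]]
          show pvJoinTok (cur.reverse :: PySem.Chars.split₀ r) = _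
          simp only [pvJoinTok, ihQ]
      · constructor
        · have hne : PySem.Chars.split₀.go r [c] [] ≠ [] := by
            rw [Ne, pv_go_eq_nil_iff]; simp
          obtain ⟨t, ts, heq⟩ := List.exists_cons_of_ne_nil hne
          have hrg := ihRG [c] (by simp)
          rw [heq] at hrg
          simp only [pvJoinTok, List.reverse_singleton, List.singleton_append] at hrg
          have hsplit : PySem.Chars.split₀ (c :: r) = t :: ts := by
            simp only [PySem.Chars.split₀, PySem.Chars.split₀.go, h, Bool.false_eq_true,
              if_false]
            exact heq
          rw [hsplit]
          have : (t :: ts).flatMap (fun u => ' ' :: u) = ' ' :: (t ++ ts.flatMap (fun u => ' ' :: u)) := by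
            simp
          rw [this, hrg]
          simp [pvM, h]
        · intro cur hcur
          have hrg := ihRG (c :: cur) (by simp)
          simp only [PySem.Chars.split₀.go, h, Bool.false_eq_true, if_false]
          rw [hrg]
          simp [pvM, h]

-- the machine from the start state computes the space-joined token list
theorem pv_P (s : List Char) : pvJoinTok (PySem.Chars.split₀ s) = pvM true true s := by
  induction s with
  | nil => simp [PySem.Chars.split₀, PySem.Chars.split₀.go, pvM, pvJoinTok]
  | cons c r ih =>
      by_cases h : PySem.Chars.isspace c = true
      · simpa [PySem.Chars.split₀, PySem.Chars.split₀.go, h, pvM] using ih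
      · have hrg := (pv_QRG r).2 [c] (by simp)
        simp only [PySem.Chars.split₀, PySem.Chars.split₀.go, h, Bool.false_eq_true, if_false,
          List.isEmpty_nil, if_true] at hrg ⊢
        rw [hrg]
        simp [pvM, h]

-- PySem's join with a single-space separator is pvJoinTok
theorem pv_join_eq (toks : List (List Char)) :
    PySem.Chars.join [' '] toks = pvJoinTok toks := by
  induction toks with
  | nil => simp [PySem.Chars.join_nil, pvJoinTok]
  | cons t ts ih =>
      cases ts with
      | nil => simp [PySem.Chars.join_singleton, pvJoinTok]
      | cons u ts' =>
          rw [PySem.Chars.join_cons_cons, ih]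
          simp [pvJoinTok]

-- B's outer fold over the present field values
theorem pv_fields (vs : List String) : ∀ out : List Char,
    (vs.foldl (fun (st : List Char × Bool) v => ((v.toList.foldl pvStep st).1, true)) (out, true)).1
      = out ++ (if out.isEmpty
          then pvJoinTok (vs.flatMap (fun v => PySem.Chars.split₀ v.toList))
          else (vs.flatMap (fun v => PySem.Chars.split₀ v.toList)).flatMap (fun u => ' ' :: u)) := by
  induction vs with
  | nil => intro out; split_ifs <;> simp [pvJoinTok]
  | cons v vs' ih =>
      intro out
      simp only [List.foldl_cons, List.flatMap_cons, pv_inv, ih]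
      by_cases hout : out = []
      · subst hout
        simp only [List.isEmpty_nil, List.nil_append, if_true]
        simp only [← pv_P]
        cases htok : PySem.Chars.split₀ v.toList with
        | nil => simp [pvJoinTok]
        | cons t ts =>
            have htne : t ≠ [] := pv_split0_tokens_ne v.toList t (by rw [htok]; simp)
            have hne : (pvJoinTok (t :: ts)).isEmpty = false := by
              simp [pvJoinTok, htne]
            simp only [hne, Bool.false_eq_true, if_false]
            simp [pvJoinTok, List.flatMap_append]
      · have h1 : out.isEmpty = false := by simpa [List.isEmpty_iff] using hout
        simp only [h1, Bool.false_eq_true, if_false]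
        simp only [← (pv_QRG v.toList).1]
        have h2 : (out ++ (PySem.Chars.split₀ v.toList).flatMap (fun u => ' ' :: u)).isEmpty = false := by
          simp [hout]
        simp [h2, List.flatMap_append]

-- a list of parts with nonempty strips joins to a nonempty string (A's branch condition)
theorem pv_strip_eq_nil_iff (s : List Char) :
    PySem.Chars.strip s = [] ↔ s.all PySem.Chars.isspace = true := by
  rw [PySem.Chars.strip, PySem.Chars.rstrip, PySem.Chars.lstrip]
  constructor
  · intro h
    simp only [List.reverse_eq_nil_iff, List.dropWhile_eq_nil_iff] at h
    have h2 : ∀ a ∈ s.dropWhile PySem.Chars.isspace, PySem.Chars.isspace a = true := by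
      intro a ha
      exact h a (by simpa using ha)
    rw [← List.takeWhile_append_dropWhile (p := PySem.Chars.isspace) (l := s), List.all_append]
    simp only [Bool.and_eq_true]
    exact ⟨List.all_takeWhile, List.all_eq_true.mpr h2⟩
  · intro h
    have h1 : s.dropWhile PySem.Chars.isspace = [] := by
      rw [List.dropWhile_eq_nil_iff]
      intro a ha
      exact List.all_eq_true.mp h a ha
    simp [h1]

theorem pv_split0_eq_nil_iff (s : List Char) :
    PySem.Chars.split₀ s = [] ↔ s.all PySem.Chars.isspace = true := by
  simp [PySem.Chars.split₀, pv_go_eq_nil_iff s [] []]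

-- an all-whitespace suffix is ignored by go
theorem pv_go_allspace (w : List Char) (hw : w.all PySem.Chars.isspace = true) : ∀ cur acc,
    PySem.Chars.split₀.go w cur acc = PySem.Chars.split₀.go [] cur acc := by
  induction w with
  | nil => intro cur acc; rfl
  | cons c rest ih =>
      intro cur acc
      simp only [List.all_cons, Bool.and_eq_true] at hw
      simp only [PySem.Chars.split₀.go, hw.1, if_true]
      split_ifs with h
      · rw [ih hw.2 [] acc]
        simp only [PySem.Chars.split₀.go]
        simp_all [List.isEmpty_iff]
      · rw [ih hw.2 [] (cur.reverse :: acc)]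
        simp only [PySem.Chars.split₀.go]
        simp_all [List.isEmpty_iff]

theorem pv_go_append_trailing (s w : List Char) (hw : w.all PySem.Chars.isspace = true) :
    ∀ cur acc, PySem.Chars.split₀.go (s ++ w) cur acc = PySem.Chars.split₀.go s cur acc := by
  induction s with
  | nil => intro cur acc; exact pv_go_allspace w hw cur acc
  | cons c rest ih =>
      intro cur acc
      simp only [List.cons_append, PySem.Chars.split₀.go]
      split_ifs <;> simp [ih]

theorem pv_split0_append_trailing (s w : List Char) (hw : w.all PySem.Chars.isspace = true) :
    PySem.Chars.split₀ (s ++ w) = PySem.Chars.split₀ s := by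
  simp [PySem.Chars.split₀, pv_go_append_trailing s w hw]

theorem pv_split0_lstrip (s : List Char) :
    PySem.Chars.split₀ (PySem.Chars.lstrip s) = PySem.Chars.split₀ s := by
  induction s with
  | nil => rfl
  | cons c rest ih =>
      by_cases h : PySem.Chars.isspace c = true
      · simpa [PySem.Chars.lstrip, List.dropWhile_cons, h, PySem.Chars.split₀,
          PySem.Chars.split₀.go] using ih
      · simp [PySem.Chars.lstrip, h]

theorem pv_split0_strip (s : List Char) :
    PySem.Chars.split₀ (PySem.Chars.strip s) = PySem.Chars.split₀ s := by
  rw [PySem.Chars.strip]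
  have hdecomp : PySem.Chars.lstrip s =
      PySem.Chars.rstrip (PySem.Chars.lstrip s) ++
        ((PySem.Chars.lstrip s).reverse.takeWhile PySem.Chars.isspace).reverse := by
    rw [PySem.Chars.rstrip]
    rw [← List.reverse_append]
    rw [List.takeWhile_append_dropWhile]
    simp
  have hw : (((PySem.Chars.lstrip s).reverse.takeWhile PySem.Chars.isspace).reverse).all
      PySem.Chars.isspace = true := by
    simp only [List.all_reverse]
    exact List.all_takeWhile
  calc PySem.Chars.split₀ (PySem.Chars.rstrip (PySem.Chars.lstrip s))
      = PySem.Chars.split₀ (PySem.Chars.rstrip (PySem.Chars.lstrip s) ++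
          ((PySem.Chars.lstrip s).reverse.takeWhile PySem.Chars.isspace).reverse) :=
        (pv_split0_append_trailing _ _ hw).symm
    _ = PySem.Chars.split₀ (PySem.Chars.lstrip s) := by rw [← hdecomp]
    _ = PySem.Chars.split₀ s := pv_split0_lstrip s

theorem pv_split0_append_space (c : Char) (hc : PySem.Chars.isspace c = true) (x y : List Char) :
    PySem.Chars.split₀ (x ++ c :: y) = PySem.Chars.split₀ x ++ PySem.Chars.split₀ y := by
  suffices h : ∀ x cur, PySem.Chars.split₀.go (x ++ c :: y) cur [] =
      PySem.Chars.split₀.go x cur [] ++ PySem.Chars.split₀.go y [] [] by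
    simpa [PySem.Chars.split₀] using h x []
  intro x
  induction x with
  | nil =>
      intro cur
      simp only [List.nil_append, PySem.Chars.split₀.go, hc, if_true]
      split_ifs with h
      · simp
      · rw [pv_go_acc y [] [cur.reverse]]
  | cons a x' ih =>
      intro cur
      simp only [List.cons_append, PySem.Chars.split₀.go]
      split_ifs with h1 h2
      · exact ih []
      · rw [pv_go_acc (x' ++ c :: y) [] (cur.reverse :: []), ih [],
          pv_go_acc x' [] (cur.reverse :: [])]
        simp
      · exact ih (a :: cur)

-- String-level: strip p = "" → split₀ p = []
theorem pv_split0_str_eq_nil (p : String) (h : PySem.Str.strip p = "") :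
    PySem.Str.split₀ p = [] := by
  have h1 : (PySem.Str.strip p).toList = [] := by rw [h]; rfl
  rw [PySem.Str.toList_strip] at h1
  have h2 : PySem.Chars.split₀ p.toList = [] :=
    (pv_split0_eq_nil_iff _).mpr ((pv_strip_eq_nil_iff _).mp h1)
  have h3 := PySem.Str.split₀_map_toList p
  rw [h2] at h3
  exact List.map_eq_nil_iff.mp h3

-- the key normalization identity, String level
theorem pv_key (L : List String) :
    PySem.Str.split₀ (PySem.Str.join " " (L.map PySem.Str.strip)) =
      L.flatMap PySem.Str.split₀ := by
  apply List.map_injective_iff.mpr (fun a b => String.toList_inj.mp)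
  rw [PySem.Str.split₀_map_toList, PySem.Str.toList_join]
  have hchars : ∀ M : List (List Char),
      PySem.Chars.split₀ (PySem.Chars.join [' '] (M.map PySem.Chars.strip)) =
        M.flatMap PySem.Chars.split₀ := by
    intro M
    induction M with
    | nil => rfl
    | cons v rest ih =>
        cases rest with
        | nil => simp [PySem.Chars.join_singleton, pv_split0_strip]
        | cons w rest' =>
            rw [List.map_cons, List.map_cons, PySem.Chars.join_cons_cons]
            rw [show PySem.Chars.strip v ++ [' '] ++
                  PySem.Chars.join [' '] (PySem.Chars.strip w :: List.map PySem.Chars.strip rest') =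
                PySem.Chars.strip v ++ (' ' ::
                  PySem.Chars.join [' '] (PySem.Chars.strip w :: List.map PySem.Chars.strip rest')) by simp]
            rw [pv_split0_append_space ' ' (by decide)]
            rw [pv_split0_strip]
            rw [List.map_cons] at ih
            rw [ih]
            simp
  have hsep : (" " : String).toList = [' '] := by decide
  rw [hsep]
  rw [List.map_map]
  rw [show (String.toList ∘ PySem.Str.strip) = (PySem.Chars.strip ∘ String.toList) by
    funext p; simp [PySem.Str.toList_strip]]
  rw [← List.map_map, hchars]
  rw [List.map_flatMap, List.flatMap_map]
  congr 1
  funext p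
  exact (PySem.Str.split₀_map_toList p).symm

-- dropping whitespace-only parts does not change the token list
theorem pv_flatMap_filter (P : List String) :
    ((P.filter (fun p => !(PySem.Str.strip p == ""))).flatMap PySem.Str.split₀) =
      P.flatMap PySem.Str.split₀ := by
  induction P with
  | nil => rfl
  | cons p rest ih =>
      by_cases h : PySem.Str.strip p = ""
      · simp [h, ih, pv_split0_str_eq_nil p h]
      · simp [h, ih]

-- a list of parts with nonempty strips joins to a nonempty string
theorem pv_join_ne_nil (L : List String) (hL : ∀ p ∈ L, ¬ (PySem.Str.strip p = ""))
    (hne : L ≠ []) : PySem.Str.join " " (L.map PySem.Str.strip) ≠ "" := by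
  cases L with
  | nil => exact absurd rfl hne
  | cons a rest =>
      intro hcontra
      have h1 : (PySem.Str.join " " ((a :: rest).map PySem.Str.strip)).toList = [] := by
        rw [hcontra]; rfl
      rw [PySem.Str.toList_join] at h1
      have ha : ¬ (PySem.Str.strip a = "") := hL a (by simp)
      have ha' : (PySem.Str.strip a).toList ≠ [] := by
        intro hh
        exact ha (String.toList_inj.mp (by simpa using hh))
      cases rest with
      | nil => exact ha' (by simpa [PySem.Chars.join_singleton] using h1)
      | cons b rest' =>
          simp only [List.map_cons, PySem.Chars.join_cons_cons] at h1
          simp at h1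

-- ===== VERDICT (by name: the statement is the Claim_ definition above) =====
theorem compose_employee_display_name_py_spec : Claim_equal_compose_employee_display_name_py := by
  intro employee _
  unfold Spec_compose_employee_display_name_py
  unfold compose_employee_display_name_py compose_employee_display_name_py_alt pvFallback
  simp only []
  set o1 := PySem.Dict.get? (PySem.Dict.mk employee) "first_name" with ho1
  set o2 := PySem.Dict.get? (PySem.Dict.mk employee) "second_name" with ho2
  set o3 := PySem.Dict.get? (PySem.Dict.mk employee) "last_name" with ho3
  set o4 := PySem.Dict.get? (PySem.Dict.mk employee) "extension" with ho4
  set P := ([o1, o2, o3, o4].filterMap id) with hP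
  set L := P.filter (fun p => !(PySem.Str.strip p == "")) with hLdef
  -- B's key fold = the field fold over the present values
  have hB : (["first_name", "second_name", "last_name", "extension"].foldl
      (fun (st : List Char × Bool) k =>
        match PySem.Dict.get? (PySem.Dict.mk employee) k with
        | some v => ((v.toList.foldl pvStep st).1, true)
        | none => st) (([] : List Char), true))
      = P.foldl (fun (st : List Char × Bool) v => ((v.toList.foldl pvStep st).1, true)) ([], true) := by
    simp only [List.foldl_cons, List.foldl_nil, ← ho1, ← ho2, ← ho3, ← ho4, hP]
    cases o1 <;> cases o2 <;> cases o3 <;> cases o4 <;> simp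
  rw [hB, pv_fields P []]
  simp only [List.isEmpty_nil, if_true, List.nil_append]
  -- B's out chars are the space-joined char tokens
  have hCT : (P.flatMap (fun v => PySem.Chars.split₀ v.toList))
      = (P.flatMap PySem.Str.split₀).map String.toList := by
    rw [List.map_flatMap]
    congr 1
    funext v
    exact (PySem.Str.split₀_map_toList v).symm
  have hL : ∀ p ∈ L, ¬ (PySem.Str.strip p = "") := by
    intro p hp
    have := List.of_mem_filter hp
    simpa using this
  have hkey : PySem.Str.split₀ (PySem.Str.join " " (L.map PySem.Str.strip)) =
      P.flatMap PySem.Str.split₀ := by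
    rw [pv_key L, hLdef, pv_flatMap_filter]
  -- B's string = A's joined string (as char lists)
  have hBA : pvJoinTok (P.flatMap (fun v => PySem.Chars.split₀ v.toList))
      = (PySem.Str.join " " (P.flatMap PySem.Str.split₀)).toList := by
    rw [PySem.Str.toList_join, show (" " : String).toList = [' '] by decide, pv_join_eq, hCT]
  by_cases hLnil : L = []
  · -- no usable parts: A's full_name is "", B's out is []
    have hfull : PySem.Str.join " " (L.map PySem.Str.strip) = "" := by
      rw [hLnil]; rfl
    have htok : P.flatMap PySem.Str.split₀ = [] := by
      rw [← hkey, hfull]; rfl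
    have hct : P.flatMap (fun v => PySem.Chars.split₀ v.toList) = [] := by
      rw [hCT, htok]; rfl
    simp [hfull, hct, pvJoinTok]
  · have hfull := pv_join_ne_nil L hL hLnil
    have htok : P.flatMap PySem.Str.split₀ ≠ [] := by
      rw [← hkey]
      intro hh
      have hLflat : L.flatMap PySem.Str.split₀ = [] := by rw [← pv_key L]; exact hh
      obtain ⟨a, rest, hcons⟩ := List.exists_cons_of_ne_nil hLnil
      have ha : ¬ (PySem.Str.strip a = "") := hL a (by rw [hcons]; simp)
      have ha0 : PySem.Str.split₀ a = [] := by
        rw [hcons] at hLflat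
        exact (List.flatMap_eq_nil_iff.mp hLflat) a (by simp)
      have hc0 : PySem.Chars.split₀ a.toList = [] := by
        rw [← PySem.Str.split₀_map_toList, ha0]; rfl
      have hs0 : (PySem.Str.strip a).toList = [] := by
        rw [PySem.Str.toList_strip]
        exact (pv_strip_eq_nil_iff _).mpr ((pv_split0_eq_nil_iff _).mp hc0)
      exact ha (String.toList_inj.mp (by simpa using hs0))
    -- B's out is nonempty: the char token list is nonempty with nonempty tokens
    have hctne : P.flatMap (fun v => PySem.Chars.split₀ v.toList) ≠ [] := by
      rw [hCT]
      simpa using htok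
    have hout : pvJoinTok (P.flatMap (fun v => PySem.Chars.split₀ v.toList)) ≠ [] := by
      obtain ⟨t, ts, hcons⟩ := List.exists_cons_of_ne_nil hctne
      have htne : t ≠ [] := by
        have : t ∈ P.flatMap (fun v => PySem.Chars.split₀ v.toList) := by rw [hcons]; simp
        obtain ⟨v, -, htv⟩ := List.mem_flatMap.mp this
        exact pv_split0_tokens_ne v.toList t htv
      rw [hcons]
      simp [pvJoinTok, htne]
    -- both take the joined branch; equate the strings
    simp only [ne_eq, hfull, not_false_eq_true, if_true, hout, if_true]
    rw [hkey]
    apply String.toList_inj.mp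
    rw [← hBA]
    exact String.toList_ofList.symm
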